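-- pv_equiv track=rewrite | github.com/Aguu21/Python | Ejercicio16b.py | vocalesLetras
-- ===== SOURCE A (Python) =====
-- def vocalesLetras(cadena):
--     '''Dada una cadena, entrega las vocales'''
--
--     cadena = cadena.split(' ')
--     consonantes = ''
--     resultado = ''
--
--     for i in range(0, len(cadena)):
--         palabra = cadena[i]
--
--         for x in range(0, len(palabra)):
--             if palabra[x] in ["a", "A", "e", "E", "i", "I", "o", "O", "u", "U"]:
--                 resultado += palabra[x]
--
--         if i != (len(cadena)-1):
--             resultado += " "
--
--     return resultado
-- ===== SOURCE B (Python) =====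
-- def vocalesLetras(cadena):
--     '''Dada una cadena, entrega las vocales'''
--     return ''.join(c for c in cadena if c in "aAeEiIoOuU ")
-- ===== Notes on version B (the rewrite author's own statement) =====
-- stated objective: simpler
-- what changed: Replaces the split-on-space / per-word index loops / separator re-insertion with a single character-level filter keeping vowels and spaces, which round-trips every space position.
import Mathlib
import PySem

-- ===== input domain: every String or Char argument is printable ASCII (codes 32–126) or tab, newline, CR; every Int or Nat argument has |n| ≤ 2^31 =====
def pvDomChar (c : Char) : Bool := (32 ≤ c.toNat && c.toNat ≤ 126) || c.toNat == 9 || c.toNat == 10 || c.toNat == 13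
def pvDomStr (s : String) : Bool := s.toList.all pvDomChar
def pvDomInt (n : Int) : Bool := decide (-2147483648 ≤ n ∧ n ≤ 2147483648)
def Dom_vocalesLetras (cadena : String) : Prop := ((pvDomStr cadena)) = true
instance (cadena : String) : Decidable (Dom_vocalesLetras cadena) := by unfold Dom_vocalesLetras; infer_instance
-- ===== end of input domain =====

-- B replaces A's split-on-space / per-word index loops / separator re-insertion with a single
-- character-level filter keeping vowels and spaces (objective: simpler).

-- ===== PORT A =====
-- the Python membership list ["a","A","e","E","i","I","o","O","u","U"] (1-char strings ↦ Char)
def pvVowels : List Char := ['a', 'A', 'e', 'E', 'i', 'I', 'o', 'O', 'u', 'U']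

def vocalesLetras (cadena : String) : String :=
  -- cadena = cadena.split(' ')
  let words := PySem.Chars.splitOn cadena.toList [' ']
  -- resultado is built as a char list and returned as a String
  String.ofList <|
    -- for i in range(0, len(cadena)):
    (PySem.List.pyRange 0 (words.length : Int)).foldl
      (fun resultado i =>
        let palabra := PySem.List.pyGetD words i []
        -- for x in range(0, len(palabra)): if palabra[x] in [...]: resultado += palabra[x]
        -- (index x is always in range here, so the total pyGetD is exact for palabra[x])
        let resultado :=
          (PySem.List.pyRange 0 (palabra.length : Int)).foldl
            (fun r x =>
              if PySem.List.pyGetD palabra x ' ' ∈ pvVowels then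
                r ++ [PySem.List.pyGetD palabra x ' ']
              else r)
            resultado
        -- if i != (len(cadena)-1): resultado += " "
        if i ≠ (words.length : Int) - 1 then resultado ++ [' '] else resultado)
      []

-- ===== PORT B =====
-- ''.join(c for c in cadena if c in "aAeEiIoOuU ")
-- ('c in "aAeEiIoOuU "' for the 1-char string c is exactly membership of the Char in its chars)
def vocalesLetras_alt (cadena : String) : String :=
  String.ofList
    (cadena.toList.filter
      (fun c => c ∈ (['a', 'A', 'e', 'E', 'i', 'I', 'o', 'O', 'u', 'U', ' '] : List Char)))

-- ===== PRECONDITION & SPEC =====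
def Spec_vocalesLetras (cadena : String) (out : String) : Prop := out = vocalesLetras_alt cadena
instance (cadena : String) (out : String) : Decidable (Spec_vocalesLetras cadena out) := by unfold Spec_vocalesLetras; infer_instance

-- ===== CLAIM (what is proved, stated in full; the proofs are below) =====
def Claim_equal_vocalesLetras : Prop := ∀ (cadena : String), Dom_vocalesLetras cadena → Spec_vocalesLetras cadena (vocalesLetras cadena)

-- ===== LEMMAS AND PROOFS =====

-- structural version of split(' '): cur is the reversed word currently being read
def pvSplit (cur : List Char) : List Char → List (List Char)
  | [] => [cur.reverse]
  | c :: rest => if c = ' ' then cur.reverse :: pvSplit [] rest else pvSplit (c :: cur) rest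

-- what A's outer loop produces from the word list: vowels of each word, ' ' after each non-last word
def pvJoin : List (List Char) → List Char
  | [] => []
  | [w] => w.filter (fun c => c ∈ pvVowels)
  | w :: ws@(_ :: _) => w.filter (fun c => c ∈ pvVowels) ++ ' ' :: pvJoin ws

theorem pvSplit_ne_nil (cur l : List Char) : pvSplit cur l ≠ [] := by
  induction l generalizing cur with
  | nil => simp [pvSplit]
  | cons c rest ih => simp only [pvSplit]; split_ifs <;> simp [ih]

theorem splitOn_go_eq (fuel : Nat) (l cur : List Char) (acc : List (List Char))
    (h : l.length < fuel) :
    PySem.Chars.splitOn.go [' '] fuel l cur acc = acc.reverse ++ pvSplit cur l := by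
  induction fuel generalizing l cur acc with
  | zero => omega
  | succ fuel ih =>
    cases l with
    | nil => simp [PySem.Chars.splitOn.go, pvSplit]
    | cons c rest =>
      simp only [PySem.Chars.splitOn.go, List.isPrefixOf, pvSplit]
      by_cases hc : c = ' '
      · subst hc
        simp only [BEq.rfl, Bool.and_true, if_pos trivial, List.length_cons,
          List.drop_succ_cons, List.length_nil, List.drop_zero]
        rw [ih _ _ _ (by simpa using Nat.lt_of_succ_lt_succ h)]
        simp
      · have hb : ((' ' == c) = false) := by simpa using fun e => hc e.symm
        simp only [hb, Bool.false_and, Bool.false_eq_true, if_false, if_neg hc]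
        exact ih _ _ _ (by simpa using Nat.lt_of_succ_lt_succ h)

theorem splitOn_eq (cs : List Char) : PySem.Chars.splitOn cs [' '] = pvSplit [] cs := by
  rw [PySem.Chars.splitOn, splitOn_go_eq _ _ _ _ (by omega)]; rfl

theorem pvJoin_pvSplit (l cur : List Char) :
    pvJoin (pvSplit cur l) =
      cur.reverse.filter (fun c => c ∈ pvVowels) ++
        l.filter (fun c => c ∈ (['a', 'A', 'e', 'E', 'i', 'I', 'o', 'O', 'u', 'U', ' '] : List Char)) := by
  induction l generalizing cur with
  | nil => simp [pvSplit, pvJoin]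
  | cons c rest ih =>
    by_cases hc : c = ' '
    · subst hc
      rw [show pvSplit cur (' ' :: rest) = cur.reverse :: pvSplit [] rest from by simp [pvSplit]]
      obtain ⟨y, ys, hy⟩ := List.exists_cons_of_ne_nil (pvSplit_ne_nil [] rest)
      rw [hy]
      rw [show pvJoin (cur.reverse :: y :: ys)
            = cur.reverse.filter (fun c => c ∈ pvVowels) ++ ' ' :: pvJoin (y :: ys) from by
          simp [pvJoin]]
      rw [← hy, ih]
      simp [pvVowels]
    · simp only [pvSplit, if_neg hc, ih, List.filter_cons]
      have h1 : (decide (c ∈ (['a', 'A', 'e', 'E', 'i', 'I', 'o', 'O', 'u', 'U', ' '] : List Char)))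
          = decide (c ∈ pvVowels) := by
        simp [pvVowels, List.mem_cons, hc]
      rw [h1]
      by_cases hv : c ∈ pvVowels <;> simp [hv]

theorem pvIndexJoin (ws : List (List Char)) (h : ws ≠ []) :
    (List.range ws.length).flatMap
      (fun (k : Nat) =>
        (PySem.List.pyGetD ws (k : Int) []).filter (fun c => c ∈ pvVowels) ++
          (if (k : Int) ≠ (ws.length : Int) - 1 then [' '] else [])) = pvJoin ws := by
  induction ws with
  | nil => simp at h
  | cons w ws ih =>
    cases ws with
    | nil => simp [pvJoin]
    | cons y ys =>
      have hlen : (w :: y :: ys).length = (y :: ys).length + 1 := rfl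
      rw [hlen, List.range_succ_eq_map]
      rw [List.flatMap_cons, List.flatMap_map]
      have h0 : (PySem.List.pyGetD (w :: y :: ys) ((0 : Nat) : Int) []) = w := by
        simp
      have hif : (((0 : Nat) : Int) ≠ (((y :: ys).length + 1 : Nat) : Int) - 1) := by
        simp only [List.length_cons]; omega
      have hcong : ∀ k ∈ List.range (y :: ys).length,
          ((PySem.List.pyGetD (w :: y :: ys) ((Nat.succ k : Nat) : Int) []).filter
              (fun c => c ∈ pvVowels) ++
            (if ((Nat.succ k : Nat) : Int) ≠ (((y :: ys).length + 1 : Nat) : Int) - 1 then [' ']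
             else []))
          = ((PySem.List.pyGetD (y :: ys) ((k : Nat) : Int) []).filter (fun c => c ∈ pvVowels) ++
              (if ((k : Nat) : Int) ≠ (((y :: ys).length : Nat) : Int) - 1 then [' '] else [])) := by
        intro k hk
        rw [PySem.List.pyGetD_natCast, PySem.List.pyGetD_natCast, List.getD_cons_succ]
        congr 1
        have hiff : (((Nat.succ k : Nat) : Int) ≠ (((y :: ys).length + 1 : Nat) : Int) - 1)
            ↔ (((k : Nat) : Int) ≠ (((y :: ys).length : Nat) : Int) - 1) := by
          omega
        simp only [hiff]
      rw [List.flatMap_congr hcong, ih (by simp), h0, if_pos hif]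
      rw [show pvJoin (w :: y :: ys)
            = w.filter (fun c => c ∈ pvVowels) ++ ' ' :: pvJoin (y :: ys) from by simp [pvJoin]]
      simp

-- ===== VERDICT (by name: the statement is the Claim_ definition above) =====
theorem vocalesLetras_spec : Claim_equal_vocalesLetras := by
  intro cadena _
  unfold Spec_vocalesLetras
  simp only [vocalesLetras, vocalesLetras_alt]
  have inner : ∀ (palabra resultado : List Char),
      (PySem.List.pyRange 0 (palabra.length : Int)).foldl
        (fun r x =>
          if PySem.List.pyGetD palabra x ' ' ∈ pvVowels then
            r ++ [PySem.List.pyGetD palabra x ' ']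
          else r)
        resultado
      = resultado ++ palabra.filter (fun c => c ∈ pvVowels) := by
    intro palabra resultado
    rw [PySem.List.foldl_pyRange_zero_pyGetD' palabra ' '
      (fun r c => if c ∈ pvVowels then r ++ [c] else r) resultado]
    exact PySem.List.foldl_append_ite_eq_filter _ _ _
  set words := PySem.Chars.splitOn cadena.toList [' '] with hwords
  have hstep : (fun (resultado : List Char) (i : Int) =>
        if i ≠ (words.length : Int) - 1 then
          (PySem.List.pyRange 0 ((PySem.List.pyGetD words i []).length : Int)).foldl
            (fun r x =>
              if PySem.List.pyGetD (PySem.List.pyGetD words i []) x ' ' ∈ pvVowels then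
                r ++ [PySem.List.pyGetD (PySem.List.pyGetD words i []) x ' ']
              else r)
            resultado ++ [' ']
        else
          (PySem.List.pyRange 0 ((PySem.List.pyGetD words i []).length : Int)).foldl
            (fun r x =>
              if PySem.List.pyGetD (PySem.List.pyGetD words i []) x ' ' ∈ pvVowels then
                r ++ [PySem.List.pyGetD (PySem.List.pyGetD words i []) x ' ']
              else r)
            resultado)
      = (fun (resultado : List Char) (i : Int) =>
          resultado ++ ((PySem.List.pyGetD words i []).filter (fun c => c ∈ pvVowels) ++
            (if i ≠ (words.length : Int) - 1 then [' '] else []))) := by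
    funext resultado i
    rw [inner]
    by_cases hi : i ≠ (words.length : Int) - 1
    · rw [if_pos hi, if_pos hi]; simp
    · rw [if_neg hi, if_neg hi]; simp
  rw [hstep, PySem.List.foldl_append_eq_flatMap, PySem.List.pyRange_zero_nat,
    List.flatMap_map, List.nil_append]
  rw [pvIndexJoin words (by rw [hwords, splitOn_eq]; exact pvSplit_ne_nil [] _)]
  rw [hwords, splitOn_eq, pvJoin_pvSplit]
  simp
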